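-- pv_equiv track=rewrite | github.com/MatthewA77/Bankcruptcy_Predictor | app12.py | get_top_executive
-- ===== SOURCE A (Python) =====
-- def get_top_executive(officers_list):
--     if not officers_list or not isinstance(officers_list, list): return "N/A"
--     title_priority = ['CEO', 'Chief Executive Officer', 'President Director', 'Co-Founder']
--     for title in title_priority:
--         for officer in officers_list:
--             if 'title' in officer and title.lower() in officer['title'].lower():
--                 return officer.get('name', 'N/A')
--     if officers_list: return officers_list[0].get('name', 'N/A')
--     return "N/A"
-- ===== SOURCE B (Python) =====
-- def get_top_executive(officers_list):
--     if not officers_list or not isinstance(officers_list, list):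
--         return "N/A"
--     priorities = ['ceo', 'chief executive officer', 'president director', 'co-founder']
--     best = None  # (priority index, officer), earliest officer with the smallest index
--     for officer in officers_list:
--         if 'title' not in officer:
--             continue
--         t = officer['title'].lower()
--         idx = next((i for i, p in enumerate(priorities) if p in t), None)
--         if idx is None:
--             continue
--         if idx == 0:
--             return officer.get('name', 'N/A')
--         if best is None or idx < best[0]:
--             best = (idx, officer)
--     if best is not None:
--         return best[1].get('name', 'N/A')
--     return officers_list[0].get('name', 'N/A')
-- ===== Notes on version B (the rewrite author's own statement) =====
-- stated objective: alternative
-- what changed: Replaced A's title-major nested loops (scan the whole officer list once per priority title) by a single pass over the officers that tracks the best (lowest) matching priority index seen so far, with an immediate return on a CEO match.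
import Mathlib
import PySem

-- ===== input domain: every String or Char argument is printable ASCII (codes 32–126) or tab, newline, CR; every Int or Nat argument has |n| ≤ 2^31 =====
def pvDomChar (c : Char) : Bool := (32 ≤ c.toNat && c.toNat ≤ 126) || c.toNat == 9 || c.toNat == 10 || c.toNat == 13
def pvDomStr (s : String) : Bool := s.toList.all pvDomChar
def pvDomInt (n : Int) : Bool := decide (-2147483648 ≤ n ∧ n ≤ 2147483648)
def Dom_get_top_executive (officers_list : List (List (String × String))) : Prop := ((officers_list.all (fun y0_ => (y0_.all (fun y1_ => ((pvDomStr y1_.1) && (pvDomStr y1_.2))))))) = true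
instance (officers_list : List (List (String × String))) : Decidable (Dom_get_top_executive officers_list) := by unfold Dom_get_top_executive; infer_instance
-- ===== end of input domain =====

-- B replaces A's title-major nested loops by one officer-major pass tracking the best priority index (alternative decomposition, same results).
-- Python dicts are association lists here; lookup is first match.

-- ===== PORT A =====
-- dict helpers: 'k in d', d[k] (guarded by the 'in' test, default irrelevant), d.get(k, dflt)
def pvHasKey (o : List (String × String)) (k : String) : Bool := (o.find? (fun p => p.1 == k)).isSome
def pvGetD (o : List (String × String)) (k dflt : String) : String := ((o.find? (fun p => p.1 == k)).map (·.2)).getD dflt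

-- 'title' in officer and title.lower() in officer['title'].lower()
def aMatches (title : String) (o : List (String × String)) : Bool :=
  pvHasKey o "title" && PySem.Str.isIn (PySem.Str.lower title) (PySem.Str.lower (pvGetD o "title" ""))

-- inner 'for officer in officers_list: … return', as first match
def aInner (title : String) (l : List (List (String × String))) : Option (List (String × String)) :=
  l.find? (aMatches title)

-- outer 'for title in title_priority'
def aOuter (l : List (List (String × String))) : List String → Option (List (String × String))
  | [] => none
  | t :: ts => match aInner t l with
      | some o => some o
      | none => aOuter l ts

def get_top_executive (officers_list : List (List (String × String))) : String :=
  match officers_list with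
  | [] => "N/A"   -- 'if not officers_list … return "N/A"' (isinstance is always true here)
  | h :: _ =>
      match aOuter officers_list ["CEO", "Chief Executive Officer", "President Director", "Co-Founder"] with
      | some o => pvGetD o "name" "N/A"
      | none => pvGetD h "name" "N/A"   -- officers_list[0].get('name','N/A')

-- ===== PORT B =====
def priLow : List String := ["ceo", "chief executive officer", "president director", "co-founder"]

-- 'best is None or idx < best[0]'
def bUpd (best : Option (Nat × List (String × String))) (i : Nat) (o : List (String × String)) :
    Option (Nat × List (String × String)) :=
  match best with
  | none => some (i, o)
  | some (j, p) => if i < j then some (i, o) else some (j, p)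

-- the single 'for officer in officers_list' loop of Source B, with early return on idx == 0
def bGo (first : List (String × String)) (best : Option (Nat × List (String × String))) :
    List (List (String × String)) → String
  | [] =>
      match best with
      | some (_, o) => pvGetD o "name" "N/A"
      | none => pvGetD first "name" "N/A"
  | o :: rest =>
      if pvHasKey o "title" then
        match priLow.findIdx? (fun p => PySem.Str.isIn p (PySem.Str.lower (pvGetD o "title" ""))) with
        | some 0 => pvGetD o "name" "N/A"
        | some i => bGo first (bUpd best i o) rest
        | none => bGo first best rest
      else bGo first best rest

def get_top_executive_alt (officers_list : List (List (String × String))) : String :=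
  match officers_list with
  | [] => "N/A"
  | h :: _ => bGo h none officers_list

-- ===== PRECONDITION & SPEC =====
def Spec_get_top_executive (officers_list : List (List (String × String))) (out : String) : Prop := out = get_top_executive_alt officers_list
instance (officers_list : List (List (String × String))) (out : String) : Decidable (Spec_get_top_executive officers_list out) := by unfold Spec_get_top_executive; infer_instance

-- ===== CLAIM (what is proved, stated in full; the proofs are below) =====
def Claim_equal_get_top_executive : Prop := ∀ (officers_list : List (List (String × String))), Dom_get_top_executive officers_list → Spec_get_top_executive officers_list (get_top_executive officers_list)

-- ===== LEMMAS AND PROOFS =====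

-- the priority index of an officer (none = no title key or no priority title matches)
def mOf (o : List (String × String)) : Option Nat :=
  if pvHasKey o "title" then
    priLow.findIdx? (fun p => PySem.Str.isIn p (PySem.Str.lower (pvGetD o "title" "")))
  else none

-- first officer whose priority index is exactly k
def Gk (k : Nat) (l : List (List (String × String))) : Option (List (String × String)) :=
  l.find? (fun o => mOf o == some k)

-- the best (index, officer) pair among indices 1..3, earliest officer with the least index
def chain (l : List (List (String × String))) : Option (Nat × List (String × String)) :=
  match Gk 1 l with
  | some o => some (1, o)
  | none => match Gk 2 l with
      | some o => some (2, o)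
      | none => match Gk 3 l with
          | some o => some (3, o)
          | none => none

def comb (b c : Option (Nat × List (String × String))) : Option (Nat × List (String × String)) :=
  match c with
  | none => b
  | some (i, o) => bUpd b i o

def headComb (i : Nat) (o : List (String × String)) (c : Option (Nat × List (String × String))) :
    Option (Nat × List (String × String)) :=
  match c with
  | none => some (i, o)
  | some (j, p) => if j < i then some (j, p) else some (i, o)

theorem mOf_lt_four {o : List (String × String)} {k : Nat} (h : mOf o = some k) : k < 4 := by
  unfold mOf priLow at h
  by_cases hk : pvHasKey o "title" = true <;>
    simp [hk, List.findIdx?_cons, List.findIdx?_nil] at h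
  split_ifs at h <;> simp_all <;> omega

theorem comb_bUpd (b : Option (Nat × List (String × String))) (i : Nat)
    (o : List (String × String)) (c : Option (Nat × List (String × String))) :
    comb (bUpd b i o) c = comb b (headComb i o c) := by
  rcases b with _ | ⟨j, p⟩ <;> rcases c with _ | ⟨m, q⟩
  · rfl
  · simp only [comb, bUpd, headComb]
    split_ifs <;> rfl
  · rfl
  · simp only [comb, bUpd, headComb]
    by_cases h1 : i < j <;> by_cases h2 : m < i <;> by_cases h3 : m < j <;>
      simp [h1, h2, h3, bUpd] <;> omega

theorem Gk_cons (k : Nat) (o : List (String × String)) (rest : List (List (String × String))) :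
    Gk k (o :: rest) = if mOf o == some k then some o else Gk k rest := by
  simp [Gk, List.find?_cons]
  split <;> simp_all

theorem chain_cons_none {o : List (String × String)} (rest : List (List (String × String)))
    (h : mOf o = none) : chain (o :: rest) = chain rest := by
  unfold chain
  rw [Gk_cons, Gk_cons, Gk_cons]
  simp [h]

theorem chain_cons_some {o : List (String × String)} {i : Nat} (rest : List (List (String × String)))
    (h : mOf o = some (i + 1)) (hlt : i + 1 < 4) :
    chain (o :: rest) = headComb (i + 1) o (chain rest) := by
  unfold chain
  rw [Gk_cons, Gk_cons, Gk_cons]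
  rcases i with _ | _ | _ | n
  · cases hg1 : Gk 1 rest <;> cases hg2 : Gk 2 rest <;> cases hg3 : Gk 3 rest <;>
      simp [h, headComb, hg1, hg2, hg3]
  · cases hg1 : Gk 1 rest <;> cases hg2 : Gk 2 rest <;> cases hg3 : Gk 3 rest <;>
      simp [h, headComb, hg1, hg2, hg3]
  · cases hg1 : Gk 1 rest <;> cases hg2 : Gk 2 rest <;> cases hg3 : Gk 3 rest <;>
      simp [h, headComb, hg1, hg2, hg3]
  · omega

-- the single pass computes: first CEO match if any, else the best of 'best' and the chain of lower priorities
theorem bGo_eq (l : List (List (String × String))) :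
    ∀ (first : List (String × String)) (best : Option (Nat × List (String × String))),
      bGo first best l =
        match Gk 0 l with
        | some o => pvGetD o "name" "N/A"
        | none =>
            match comb best (chain l) with
            | some (_, o) => pvGetD o "name" "N/A"
            | none => pvGetD first "name" "N/A" := by
  induction l with
  | nil => intro first best; simp [bGo, Gk, chain, comb]
  | cons o rest ih =>
    intro first best
    by_cases hk : pvHasKey o "title" = true
    · cases hf : priLow.findIdx? (fun p => PySem.Str.isIn p (PySem.Str.lower (pvGetD o "title" ""))) with
      | none =>
          have hm : mOf o = none := by unfold mOf; rw [hk]; simpa using hf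
          simp only [bGo, hk, if_true, hf]
          rw [ih, Gk_cons, chain_cons_none rest hm]
          simp [hm]
      | some i =>
          have hm : mOf o = some i := by unfold mOf; rw [hk]; simpa using hf
          cases i with
          | zero =>
              simp only [bGo, hk, if_true, hf]
              rw [Gk_cons]
              simp [hm]
          | succ j =>
              simp only [bGo, hk, if_true, hf]
              rw [ih, Gk_cons, chain_cons_some rest hm (mOf_lt_four hm), comb_bUpd]
              simp [hm]
    · have hm : mOf o = none := by simp [mOf, hk]
      simp only [bGo, hk]
      rw [ih, Gk_cons, chain_cons_none rest hm]
      simp [hm]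

theorem find?_congr' {α : Type} (p q : α → Bool) (l : List α) (h : ∀ x ∈ l, p x = q x) :
    l.find? p = l.find? q := by
  induction l with
  | nil => rfl
  | cons a t ih =>
    simp only [List.find?_cons]
    rw [h a (List.mem_cons_self), ih (fun x hx => h x (List.mem_cons_of_mem a hx))]

-- pointwise characterisations of A's four match tests in terms of mOf
theorem aMatches0 (o : List (String × String)) :
    aMatches "CEO" o = (mOf o == some 0) := by
  have hl : PySem.Str.lower "CEO" = "ceo" := by decide
  unfold aMatches mOf priLow
  rw [hl]
  by_cases hk : pvHasKey o "title" = true <;>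
    cases hc0 : PySem.Str.isIn "ceo" (PySem.Str.lower (pvGetD o "title" "")) <;>
    cases hc1 : PySem.Str.isIn "chief executive officer" (PySem.Str.lower (pvGetD o "title" "")) <;>
    cases hc2 : PySem.Str.isIn "president director" (PySem.Str.lower (pvGetD o "title" "")) <;>
    cases hc3 : PySem.Str.isIn "co-founder" (PySem.Str.lower (pvGetD o "title" "")) <;>
      simp_all [List.findIdx?_cons, List.findIdx?_nil]

theorem aMatches1 (o : List (String × String)) (h0 : mOf o ≠ some 0) :
    aMatches "Chief Executive Officer" o = (mOf o == some 1) := by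
  have hl : PySem.Str.lower "Chief Executive Officer" = "chief executive officer" := by decide
  unfold aMatches mOf priLow
  unfold mOf priLow at h0
  rw [hl]
  by_cases hk : pvHasKey o "title" = true <;>
    cases hc0 : PySem.Str.isIn "ceo" (PySem.Str.lower (pvGetD o "title" "")) <;>
    cases hc1 : PySem.Str.isIn "chief executive officer" (PySem.Str.lower (pvGetD o "title" "")) <;>
    cases hc2 : PySem.Str.isIn "president director" (PySem.Str.lower (pvGetD o "title" "")) <;>
    cases hc3 : PySem.Str.isIn "co-founder" (PySem.Str.lower (pvGetD o "title" "")) <;>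
      simp_all [List.findIdx?_cons, List.findIdx?_nil]

theorem aMatches2 (o : List (String × String)) (h0 : mOf o ≠ some 0) (h1 : mOf o ≠ some 1) :
    aMatches "President Director" o = (mOf o == some 2) := by
  have hl : PySem.Str.lower "President Director" = "president director" := by decide
  unfold aMatches mOf priLow
  unfold mOf priLow at h0 h1
  rw [hl]
  by_cases hk : pvHasKey o "title" = true <;>
    cases hc0 : PySem.Str.isIn "ceo" (PySem.Str.lower (pvGetD o "title" "")) <;>
    cases hc1 : PySem.Str.isIn "chief executive officer" (PySem.Str.lower (pvGetD o "title" "")) <;>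
    cases hc2 : PySem.Str.isIn "president director" (PySem.Str.lower (pvGetD o "title" "")) <;>
    cases hc3 : PySem.Str.isIn "co-founder" (PySem.Str.lower (pvGetD o "title" "")) <;>
      simp_all [List.findIdx?_cons, List.findIdx?_nil]

theorem aMatches3 (o : List (String × String)) (h0 : mOf o ≠ some 0) (h1 : mOf o ≠ some 1)
    (h2 : mOf o ≠ some 2) :
    aMatches "Co-Founder" o = (mOf o == some 3) := by
  have hl : PySem.Str.lower "Co-Founder" = "co-founder" := by decide
  unfold aMatches mOf priLow
  unfold mOf priLow at h0 h1 h2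
  rw [hl]
  by_cases hk : pvHasKey o "title" = true <;>
    cases hc0 : PySem.Str.isIn "ceo" (PySem.Str.lower (pvGetD o "title" "")) <;>
    cases hc1 : PySem.Str.isIn "chief executive officer" (PySem.Str.lower (pvGetD o "title" "")) <;>
    cases hc2 : PySem.Str.isIn "president director" (PySem.Str.lower (pvGetD o "title" "")) <;>
    cases hc3 : PySem.Str.isIn "co-founder" (PySem.Str.lower (pvGetD o "title" "")) <;>
      simp_all [List.findIdx?_cons, List.findIdx?_nil]

-- ===== VERDICT (by name: the statement is the Claim_ definition above) =====
theorem get_top_executive_spec : Claim_equal_get_top_executive := by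
  intro l _
  unfold Spec_get_top_executive
  match l with
  | [] => rfl
  | h :: t =>
    show get_top_executive (h :: t) = get_top_executive_alt (h :: t)
    simp only [get_top_executive, get_top_executive_alt]
    rw [bGo_eq]
    have hF0 : aInner "CEO" (h :: t) = Gk 0 (h :: t) :=
      find?_congr' _ _ _ (fun o _ => aMatches0 o)
    cases hg0 : Gk 0 (h :: t) with
    | some o => simp [aOuter, aInner] at hF0 ⊢; rw [hF0, hg0]
    | none =>
      have hn0 : ∀ o ∈ h :: t, mOf o ≠ some 0 := by
        intro o ho
        have := List.find?_eq_none.mp hg0 o ho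
        simpa using this
      have hF1 : aInner "Chief Executive Officer" (h :: t) = Gk 1 (h :: t) :=
        find?_congr' _ _ _ (fun o ho => aMatches1 o (hn0 o ho))
      simp only [aOuter]
      rw [hF0, hg0, hF1]
      cases hg1 : Gk 1 (h :: t) with
      | some o => simp [chain, comb, bUpd, hg1]
      | none =>
        have hn1 : ∀ o ∈ h :: t, mOf o ≠ some 1 := by
          intro o ho
          have := List.find?_eq_none.mp hg1 o ho
          simpa using this
        have hF2 : aInner "President Director" (h :: t) = Gk 2 (h :: t) :=
          find?_congr' _ _ _ (fun o ho => aMatches2 o (hn0 o ho) (hn1 o ho))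
        rw [hF2]
        cases hg2 : Gk 2 (h :: t) with
        | some o => simp [chain, comb, bUpd, hg1, hg2]
        | none =>
          have hn2 : ∀ o ∈ h :: t, mOf o ≠ some 2 := by
            intro o ho
            have := List.find?_eq_none.mp hg2 o ho
            simpa using this
          have hF3 : aInner "Co-Founder" (h :: t) = Gk 3 (h :: t) :=
            find?_congr' _ _ _ (fun o ho => aMatches3 o (hn0 o ho) (hn1 o ho) (hn2 o ho))
          rw [hF3]
          cases hg3 : Gk 3 (h :: t) with
          | some o => simp [chain, comb, bUpd, hg1, hg2, hg3]
          | none => simp [chain, comb, hg1, hg2, hg3]
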